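-- pv_equiv track=rewrite | github.com/SoftCharacter/LightRAG-Demo | src/webui/visualization.py | select_core_nodes
-- ===== SOURCE A (Python) =====
-- from typing import List, Dict, Any, Set
--
-- def select_core_nodes(nodes: List[Dict], edges: List[Dict], top_n_per_type: int = 3) -> Set[str]:
--     """
--     选择核心节点：每种实体类型中度数最高的 Top N 个节点
--
--     Args:
--         nodes: 所有节点列表
--         edges: 所有边列表
--         top_n_per_type: 每种类型显示的最大节点数
--
--     Returns:
--         核心节点 ID 集合
--     """
--     from collections import defaultdict
--
--     # 计算每个节点的度数（入度 + 出度）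
--     degree_count = defaultdict(int)
--     for edge in edges:
--         source = str(edge.get("source_id") or edge.get("source") or "")
--         target = str(edge.get("target_id") or edge.get("target") or "")
--         if source:
--             degree_count[source] += 1
--         if target:
--             degree_count[target] += 1
--
--     # 按实体类型分组节点
--     nodes_by_type = defaultdict(list)
--     for node in nodes:
--         node_id = str(node.get("id") or node.get("entity_id") or node.get("entity_name") or "")
--         if not node_id:
--             continue
--         entity_type = node.get("entity_type") or "Other"
--         # 标准化类型名称
--         entity_type_lower = entity_type.lower()
--         degree = degree_count.get(node_id, 0)
--         nodes_by_type[entity_type_lower].append((node_id, degree))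
--
--     # 每种类型选择度数最高的 Top N 个节点
--     core_node_ids = set()
--     for entity_type, node_list in nodes_by_type.items():
--         # 按度数降序排序
--         sorted_nodes = sorted(node_list, key=lambda x: x[1], reverse=True)
--         # 选择 Top N
--         for node_id, degree in sorted_nodes[:top_n_per_type]:
--             core_node_ids.add(node_id)
--
--     # 如果核心节点太少，至少保留一些节点
--     if len(core_node_ids) < 3 and nodes:
--         # 添加度数最高的节点
--         all_nodes_sorted = sorted(
--             [(str(n.get("id") or ""), degree_count.get(str(n.get("id") or ""), 0)) for n in nodes if n.get("id")],
--             key=lambda x: x[1],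
--             reverse=True
--         )
--         for node_id, _ in all_nodes_sorted[:5]:
--             core_node_ids.add(node_id)
--
--     return core_node_ids
-- ===== SOURCE B (Python) =====
-- from collections import Counter
--
--
-- def _first(d, keys):
--     """First truthy value among d[k] for k in keys, as str; '' if none."""
--     for k in keys:
--         v = d.get(k)
--         if v:
--             return str(v)
--     return ""
--
--
-- def _place(item, lst, cap):
--     """Insert item into the degree-descending list lst (after equal degrees,
--     keeping arrival order) and truncate to at most cap entries, recursively."""
--     if cap <= 0:
--         return []
--     if not lst or lst[0][1] < item[1]:
--         return [item] + lst[:cap - 1]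
--     return [lst[0]] + _place(item, lst[1:], cap - 1)
--
--
-- def select_core_nodes(nodes, edges, top_n_per_type=3):
--     endpoints = []
--     for edge in edges:
--         for e in (_first(edge, ("source_id", "source")), _first(edge, ("target_id", "target"))):
--             if e:
--                 endpoints.append(e)
--     degree_count = Counter(endpoints)
--
--     tops = {}
--     for node in nodes:
--         node_id = _first(node, ("id", "entity_id", "entity_name"))
--         if node_id:
--             t = (node.get("entity_type") or "Other").lower()
--             tops[t] = _place((node_id, degree_count.get(node_id, 0)), tops.get(t, []), top_n_per_type)
--
--     core_node_ids = {nid for lst in tops.values() for nid, _ in lst}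
--
--     if len(core_node_ids) < 3 and nodes:
--         by_degree = sorted(
--             [(_first(n, ("id",)), degree_count.get(_first(n, ("id",)), 0)) for n in nodes if n.get("id")],
--             key=lambda x: x[1],
--             reverse=True,
--         )
--         for nid, _ in by_degree[:5]:
--             core_node_ids.add(nid)
--
--     return core_node_ids
-- ===== Notes on version B (the rewrite author's own statement) =====
-- stated objective: alternative
-- what changed: B replaces A's three-stage pipeline (conditional degree increments per edge, grouping nodes into per-type buckets, then a full sort of every bucket) by flattening edges into one endpoint list counted with a Counter, and by a recursive bounded placement that fuses ordered insertion with truncation so the selection phase never sorts; field extraction goes through one generic first-truthy-key helper instead of repeated or-chains.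
import Mathlib
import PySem

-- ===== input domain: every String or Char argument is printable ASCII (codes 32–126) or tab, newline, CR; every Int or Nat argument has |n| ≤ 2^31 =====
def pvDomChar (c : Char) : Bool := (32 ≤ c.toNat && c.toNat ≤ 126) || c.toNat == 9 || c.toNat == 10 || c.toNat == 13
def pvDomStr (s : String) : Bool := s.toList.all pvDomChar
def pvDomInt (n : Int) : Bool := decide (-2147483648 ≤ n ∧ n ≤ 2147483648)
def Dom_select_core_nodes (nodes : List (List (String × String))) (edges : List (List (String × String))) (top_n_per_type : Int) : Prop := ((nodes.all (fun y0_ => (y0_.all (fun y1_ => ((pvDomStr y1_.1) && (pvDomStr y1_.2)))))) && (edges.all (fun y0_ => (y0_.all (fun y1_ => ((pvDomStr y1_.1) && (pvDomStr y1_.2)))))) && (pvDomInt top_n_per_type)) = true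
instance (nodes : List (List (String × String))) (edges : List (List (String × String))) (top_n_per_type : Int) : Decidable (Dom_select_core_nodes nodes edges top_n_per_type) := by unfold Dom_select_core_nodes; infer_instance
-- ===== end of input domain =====

-- B flattens the edges into one endpoint list counted by a Counter and fuses ordered
-- insertion with truncation in a recursive bounded placement, so its selection phase
-- never sorts; return value only is compared.

-- ===== PORT A =====
-- `d.get(k)` on a str->str dict, used in `or` chains (None and "" are both falsy)
def pvGetS (d : List (String × String)) (k : String) : String := ((PySem.Dict.mk d).get? k).getD ""
-- Python `a or b` on strings
def pyOrStr (a b : String) : String := if a == "" then b else a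
-- str(edge.get("source_id") or edge.get("source") or "")
def pvEdgeSource (edge : List (String × String)) : String := pyOrStr (pvGetS edge "source_id") (pyOrStr (pvGetS edge "source") "")
def pvEdgeTarget (edge : List (String × String)) : String := pyOrStr (pvGetS edge "target_id") (pyOrStr (pvGetS edge "target") "")
-- str(node.get("id") or node.get("entity_id") or node.get("entity_name") or "")
def pvNodeId (node : List (String × String)) : String := pyOrStr (pvGetS node "id") (pyOrStr (pvGetS node "entity_id") (pyOrStr (pvGetS node "entity_name") ""))
-- (node.get("entity_type") or "Other").lower()
def pvTypeLower (node : List (String × String)) : String := PySem.Str.lower (pyOrStr (pvGetS node "entity_type") "Other")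
-- 'for node_id, degree in lst: core_node_ids.add(node_id)'
def pvAddAll (core : PySem.Set String) (l : List (String × Int)) : PySem.Set String := l.foldl (fun c q => PySem.Set.add c q.1) core
-- the final 'if len(core_node_ids) < 3 and nodes:' block of A
def pvFallback (nodes : List (List (String × String))) (deg : PySem.Dict String Int) (core : PySem.Set String) : PySem.Set String :=
  if core.length < 3 ∧ nodes ≠ [] then
    pvAddAll core (PySem.List.slice (PySem.List.sorted ((nodes.filter (fun nd => pvGetS nd "id" ≠ "")).map (fun nd => (pvGetS nd "id", deg.getD (pvGetS nd "id") 0))) (fun x => x.2) true) none (some 5))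
  else core
-- defaultdict(int): degree_count[source] += 1  (d[k] += 1 is modify k 0 (+1))
def pvDegStepA (d : PySem.Dict String Int) (edge : List (String × String)) : PySem.Dict String Int :=
  let d1 := if pvEdgeSource edge ≠ "" then d.modify (pvEdgeSource edge) 0 (· + 1) else d
  if pvEdgeTarget edge ≠ "" then d1.modify (pvEdgeTarget edge) 0 (· + 1) else d1
def pvDegA (edges : List (List (String × String))) : PySem.Dict String Int := edges.foldl pvDegStepA PySem.Dict.empty
-- defaultdict(list): nodes_by_type[type].append((node_id, degree))
def pvGroupStepA (deg : PySem.Dict String Int) (d : PySem.Dict String (List (String × Int))) (node : List (String × String)) : PySem.Dict String (List (String × Int)) :=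
  if pvNodeId node = "" then d
  else d.modify (pvTypeLower node) [] (· ++ [(pvNodeId node, deg.getD (pvNodeId node) 0)])
-- for each type (dict order): add the ids of sorted(bucket, key=deg, reverse=True)[:top_n]
def pvCoreA (nodes : List (List (String × String))) (deg : PySem.Dict String Int) (n : Int) : PySem.Set String :=
  ((nodes.foldl (pvGroupStepA deg) PySem.Dict.empty).items).foldl
    (fun core p => pvAddAll core (PySem.List.slice (PySem.List.sorted p.2 (fun x => x.2) true) none (some n)))
    PySem.Set.empty

def select_core_nodes (nodes : List (List (String × String))) (edges : List (List (String × String))) (top_n_per_type : Int) : List String :=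
  pvFallback nodes (pvDegA edges) (pvCoreA nodes (pvDegA edges) top_n_per_type)

-- ===== PORT B =====
-- _first(d, keys): first truthy d.get(k) among keys, as str; '' if none
def pvFirst (d : List (String × String)) : List String → String
  | [] => ""
  | k :: ks =>
    let v := ((PySem.Dict.mk d).get? k).getD ""
    if v ≠ "" then v else pvFirst d ks
-- _place(item, lst, cap): recursive insertion into a degree-descending list, truncated to cap
def pvPlace (item : String × Int) : List (String × Int) → Int → List (String × Int)
  | [], cap =>
    if cap ≤ 0 then [] else item :: PySem.List.slice ([] : List (String × Int)) none (some (cap - 1))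
  | p :: rest, cap =>
    if cap ≤ 0 then []
    else if p.2 < item.2 then item :: PySem.List.slice (p :: rest) none (some (cap - 1))
    else p :: pvPlace item rest (cap - 1)
-- the inner 'for e in (...): if e: endpoints.append(e)'
def pvEndpointsStep (acc : List String) (edge : List (String × String)) : List String :=
  [pvFirst edge ["source_id", "source"], pvFirst edge ["target_id", "target"]].foldl
    (fun a e => if e ≠ "" then a ++ [e] else a) acc
def pvEndpoints (edges : List (List (String × String))) : List String := edges.foldl pvEndpointsStep []
-- degree_count = Counter(endpoints)
def pvDegB (edges : List (List (String × String))) : PySem.Dict String Int := PySem.Dict.counter (pvEndpoints edges)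
-- tops[t] = _place((node_id, degree_count.get(node_id, 0)), tops.get(t, []), top_n_per_type)
def pvTopsStep (deg : PySem.Dict String Int) (n : Int) (d : PySem.Dict String (List (String × Int))) (node : List (String × String)) : PySem.Dict String (List (String × Int)) :=
  let nid := pvFirst node ["id", "entity_id", "entity_name"]
  if nid ≠ "" then
    let t := PySem.Str.lower (let v := ((PySem.Dict.mk node).get? "entity_type").getD ""
                              if v ≠ "" then v else "Other")
    d.insert t (pvPlace (nid, deg.getD nid 0) (d.getD t []) n)
  else d
-- {nid for lst in tops.values() for nid, _ in lst}
def pvCoreB (nodes : List (List (String × String))) (deg : PySem.Dict String Int) (n : Int) : PySem.Set String :=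
  PySem.Set.ofList (((nodes.foldl (pvTopsStep deg n) PySem.Dict.empty).values).flatMap (fun lst => lst.map (fun q => q.1)))
-- B's final 'if len(core_node_ids) < 3 and nodes:' block
def pvFallbackB (nodes : List (List (String × String))) (deg : PySem.Dict String Int) (core : PySem.Set String) : PySem.Set String :=
  if core.length < 3 ∧ nodes ≠ [] then
    (PySem.List.slice
      (PySem.List.sorted
        ((nodes.filter (fun nd => ((PySem.Dict.mk nd).get? "id").getD "" ≠ "")).map
          (fun nd => (pvFirst nd ["id"], deg.getD (pvFirst nd ["id"]) 0)))
        (fun x => x.2) true)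
      none (some 5)).foldl (fun c q => PySem.Set.add c q.1) core
  else core

def select_core_nodes_alt (nodes : List (List (String × String))) (edges : List (List (String × String))) (top_n_per_type : Int) : List String :=
  pvFallbackB nodes (pvDegB edges) (pvCoreB nodes (pvDegB edges) top_n_per_type)

-- ===== PRECONDITION & SPEC =====
-- Pre_ excludes negative top_n_per_type (outside the function's natural domain of nonnegative
-- counts): there A's slice sorted_nodes[:n] drops |n| elements from the END of each bucket,
-- while B's bounded placement keeps nothing, so the returned sets differ.
def Pre_select_core_nodes (nodes : List (List (String × String))) (edges : List (List (String × String))) (top_n_per_type : Int) : Prop := 0 ≤ top_n_per_type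
instance (nodes : List (List (String × String))) (edges : List (List (String × String))) (top_n_per_type : Int) : Decidable (Pre_select_core_nodes nodes edges top_n_per_type) := by unfold Pre_select_core_nodes; infer_instance
def pvWitness_select_core_nodes : (List (List (String × String))) × (List (List (String × String))) × Int :=
  ([[("id", "a"), ("entity_type", "P")], [("id", "b")]], [[("source", "a"), ("target", "b")]], 1)
def Spec_select_core_nodes (nodes : List (List (String × String))) (edges : List (List (String × String))) (top_n_per_type : Int) (out : List String) : Prop := out = select_core_nodes_alt nodes edges top_n_per_type
instance (nodes : List (List (String × String))) (edges : List (List (String × String))) (top_n_per_type : Int) (out : List String) : Decidable (Spec_select_core_nodes nodes edges top_n_per_type out) := by unfold Spec_select_core_nodes; infer_instance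

-- ===== CLAIM (what is proved, stated in full; the proofs are below) =====
def Claim_equal_select_core_nodes : Prop := ∀ (nodes : List (List (String × String))) (edges : List (List (String × String))) (top_n_per_type : Int), Dom_select_core_nodes nodes edges top_n_per_type → Pre_select_core_nodes nodes edges top_n_per_type → Spec_select_core_nodes nodes edges top_n_per_type (select_core_nodes nodes edges top_n_per_type)

-- ===== LEMMAS AND PROOFS =====

-- pvFirst over explicit key lists is the corresponding `or`-chain of A
theorem pvFirst_one (d : List (String × String)) (k : String) :
    pvFirst d [k] = pvGetS d k := by
  by_cases h : pvGetS d k = "" <;> simp_all [pvFirst, pvGetS]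

theorem pvFirst_cons (d : List (String × String)) (k : String) (ks : List String) :
    pvFirst d (k :: ks) = pyOrStr (pvGetS d k) (pvFirst d ks) := by
  by_cases h : pvGetS d k = "" <;> simp_all [pvFirst, pvGetS, pyOrStr]

theorem pvFirst_src (e : List (String × String)) :
    pvFirst e ["source_id", "source"] = pvEdgeSource e := by
  rw [pvFirst_cons, pvFirst_one]
  unfold pvEdgeSource
  by_cases h : pvGetS e "source" = "" <;> simp [pyOrStr, h]

theorem pvFirst_tgt (e : List (String × String)) :
    pvFirst e ["target_id", "target"] = pvEdgeTarget e := by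
  rw [pvFirst_cons, pvFirst_one]
  unfold pvEdgeTarget
  by_cases h : pvGetS e "target" = "" <;> simp [pyOrStr, h]

theorem pvFirst_nid (node : List (String × String)) :
    pvFirst node ["id", "entity_id", "entity_name"] = pvNodeId node := by
  rw [pvFirst_cons, pvFirst_cons, pvFirst_one]
  unfold pvNodeId
  by_cases h : pvGetS node "entity_name" = "" <;> simp [pyOrStr, h]

-- B's inlined entity-type expression is A's pvTypeLower
theorem pvTypeB_eq (node : List (String × String)) :
    PySem.Str.lower (let v := ((PySem.Dict.mk node).get? "entity_type").getD ""
                     if v ≠ "" then v else "Other") = pvTypeLower node := by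
  unfold pvTypeLower pyOrStr pvGetS
  by_cases h : ((PySem.Dict.mk node).get? "entity_type").getD "" = "" <;> simp [h]

-- the 0/1/2-element endpoint contribution of one edge
def pvEpl (edge : List (String × String)) : List String :=
  (if pvEdgeSource edge ≠ "" then [pvEdgeSource edge] else []) ++
  (if pvEdgeTarget edge ≠ "" then [pvEdgeTarget edge] else [])

theorem pvEndpointsStep_eq (acc : List String) (edge : List (String × String)) :
    pvEndpointsStep acc edge = acc ++ pvEpl edge := by
  unfold pvEndpointsStep pvEpl
  rw [pvFirst_src, pvFirst_tgt]
  by_cases hs : pvEdgeSource edge = "" <;> by_cases ht : pvEdgeTarget edge = "" <;>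
    simp [hs, ht]

-- the two degree dicts are equal
theorem pv_deg_eq (edges : List (List (String × String))) : pvDegB edges = pvDegA edges := by
  unfold pvDegB pvDegA pvEndpoints
  have h1 : edges.foldl pvEndpointsStep [] = edges.flatMap pvEpl := by
    have h2 : edges.foldl pvEndpointsStep ([] : List String) =
        edges.foldl (fun acc e => acc ++ pvEpl e) [] :=
      PySem.List.foldl_congr_mem edges _ _ _ (fun acc x _ => pvEndpointsStep_eq acc x)
    rw [h2]
    simpa using PySem.List.foldl_append_eq_flatMap pvEpl edges ([] : List String)
  rw [h1, PySem.Dict.counter_eq_foldl, List.foldl_flatMap]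
  apply PySem.List.foldl_congr_mem
  intro d edge _
  unfold pvDegStepA pvEpl
  by_cases hs : pvEdgeSource edge = "" <;> by_cases ht : pvEdgeTarget edge = "" <;>
    simp [hs, ht]

-- _place is ordered insertion truncated once (for a nonnegative cap)
theorem pvPlace_eq (q : String × Int) :
    ∀ (lst : List (String × Int)) (cap : Int), 0 ≤ cap →
      pvPlace q lst cap =
        (PySem.List.insertBy (fun a b => decide (b.2 < a.2)) q lst).take cap.toNat := by
  intro lst
  induction lst with
  | nil =>
    intro cap hc
    by_cases h : cap ≤ 0
    · have : cap = 0 := le_antisymm h hc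
      simp [pvPlace, this, PySem.List.insertBy]
    · have h1 : 1 ≤ cap.toNat := by omega
      have h2 : (0:Int) ≤ cap - 1 := by omega
      simp [pvPlace, h, PySem.List.insertBy, List.take_of_length_le, h1,
        PySem.List.slice_to ([] : List (String × Int)) h2]
  | cons p rest ih =>
    intro cap hc
    by_cases h : cap ≤ 0
    · have : cap = 0 := le_antisymm h hc
      simp [pvPlace, this]
    · have hc1 : 0 ≤ cap - 1 := by omega
      have htn : cap.toNat = (cap - 1).toNat + 1 := by omega
      by_cases hlt : p.2 < q.2
      · simp only [pvPlace, h, if_false, hlt, PySem.List.insertBy, decide_eq_true_eq]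
        rw [PySem.List.slice_to _ hc1, htn]
        simp
      · simp only [pvPlace, h, if_false, hlt, PySem.List.insertBy, decide_eq_true_eq]
        rw [ih (cap - 1) hc1, htn]
        simp

-- B's tops step, rewritten as A-shaped skip + modify with the truncated-insertion update
theorem pvTopsStep_eq (deg : PySem.Dict String Int) (n : Int)
    (d : PySem.Dict String (List (String × Int))) (node : List (String × String)) :
    pvTopsStep deg n d node =
      if pvNodeId node = "" then d
      else d.modify (pvTypeLower node) []
        (fun lst => pvPlace (pvNodeId node, deg.getD (pvNodeId node) 0) lst n) := by
  unfold pvTopsStep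
  rw [pvFirst_nid, pvTypeB_eq]
  by_cases h : pvNodeId node = "" <;> simp [h]
  rfl

-- truncating before or after an insertion gives the same truncated list
theorem pv_insertBy_cons {α : Type} (b : α → α → Bool) (x y : α) (ys : List α) :
    PySem.List.insertBy b x (y :: ys) = if b x y then x :: y :: ys else y :: PySem.List.insertBy b x ys := rfl

theorem pv_insertBy_take {α : Type} (b : α → α → Bool) (x : α) :
    ∀ (l : List α) (m : Nat), (PySem.List.insertBy b x l).take m = (PySem.List.insertBy b x (l.take m)).take m := by
  intro l
  induction l with
  | nil => intro m; rw [List.take_nil]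
  | cons y t ih =>
    intro m
    cases m with
    | zero => simp
    | succ k =>
      by_cases hb : b x y
      · simp only [List.take_succ_cons, pv_insertBy_cons, hb, if_true]
        cases k with
        | zero => simp
        | succ j => simp [List.take_take]
      · simp only [List.take_succ_cons, pv_insertBy_cons, hb, if_false, Bool.false_eq_true]
        simp [ih k]

-- a fold that truncates to m after every insertion = insertion sort, truncated once
theorem pv_foldl_insert_take {α β : Type} (b : β → β → Bool) (m : Nat) (f : α → β) (ys : List α) :
    ys.foldl (fun v y => (PySem.List.insertBy b (f y) v).take m) [] =
      (ys.foldl (fun v y => PySem.List.insertBy b (f y) v) []).take m := by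
  induction ys using List.reverseRecOn with
  | nil => rw [List.foldl_nil, List.foldl_nil, List.take_nil]
  | append_singleton ys y ih =>
    rw [List.foldl_append, List.foldl_append, List.foldl_cons, List.foldl_nil,
        List.foldl_cons, List.foldl_nil, ih]
    exact (pv_insertBy_take b (f y) _ m).symm

-- 'if skip-condition: continue' loop = fold over the filtered list
theorem pv_foldl_skip {α δ : Type} (p : α → Prop) [DecidablePred p] (f : δ → α → δ) (l : List α) (init : δ) :
    l.foldl (fun acc x => if p x then acc else f acc x) init =
      (l.filter (fun x => decide ¬ (p x))).foldl f init := by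
  induction l generalizing init with
  | nil => rfl
  | cons x xs ih =>
    by_cases h : p x <;> simp [h, ih]

-- getD through a fold of modifies keyed by `k` = fold of the updates over the matching elements
theorem pv_getD_foldl_modify_key {κ ν α : Type} [BEq κ] [LawfulBEq κ] [DecidableEq κ]
    (l : List α) (k : α → κ) (d0 : ν) (g : α → ν → ν) (c : κ) :
    ∀ (d : PySem.Dict κ ν),
      (l.foldl (fun d x => d.modify (k x) d0 (g x)) d).getD c d0 =
        (l.filter (fun x => k x == c)).foldl (fun v x => g x v) (d.getD c d0) := by
  induction l with
  | nil => intro d; rfl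
  | cons x xs ih =>
    intro d
    simp only [List.foldl_cons, List.filter_cons]
    by_cases h : k x = c
    · simp [h, ih]
    · have h2 : (d.modify (k x) d0 (g x)).getD c d0 = d.getD c d0 := by
        rw [PySem.Dict.getD_modify]; exact if_neg (fun hc => h hc.symm)
      simp [h, ih, h2]

-- the per-type value B keeps = sorted-descending bucket value A builds, truncated
theorem pv_tops_getD_eq (deg : PySem.Dict String Int) (n : Int) (hn : 0 ≤ n)
    (P : List (List (String × String))) (t : String) :
    (P.foldl (fun d node => d.modify (pvTypeLower node) []
        (fun lst => pvPlace (pvNodeId node, deg.getD (pvNodeId node) 0) lst n)) PySem.Dict.empty).getD t [] =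
      PySem.List.slice
        (PySem.List.sorted
          ((P.foldl (fun d node => d.modify (pvTypeLower node) []
              (· ++ [(pvNodeId node, deg.getD (pvNodeId node) 0)])) PySem.Dict.empty).getD t [])
          (fun x => x.2) true)
        none (some n) := by
  rw [pv_getD_foldl_modify_key P pvTypeLower ([] : List (String × Int))
        (fun node lst => pvPlace (pvNodeId node, deg.getD (pvNodeId node) 0) lst n) t,
      pv_getD_foldl_modify_key P pvTypeLower ([] : List (String × Int))
        (fun node lst => lst ++ [(pvNodeId node, deg.getD (pvNodeId node) 0)]) t]
  simp only [PySem.Dict.getD_empty]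
  rw [PySem.List.foldl_append_singleton_eq_map, List.nil_append]
  rw [PySem.List.sorted_rev_eq_foldl_insertBy]
  simp only [PySem.List.slice_to _ hn]
  rw [List.foldl_map]
  have hcong : (P.filter (fun x => pvTypeLower x == t)).foldl
      (fun v node => pvPlace (pvNodeId node, deg.getD (pvNodeId node) 0) v n) [] =
      (P.filter (fun x => pvTypeLower x == t)).foldl
      (fun v node => (PySem.List.insertBy (fun a b => decide (b.2 < a.2))
        (pvNodeId node, deg.getD (pvNodeId node) 0) v).take n.toNat) [] :=
    PySem.List.foldl_congr_mem _ _ _ _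
      (fun v node _ => pvPlace_eq (pvNodeId node, deg.getD (pvNodeId node) 0) v n hn)
  rw [hcong]
  exact pv_foldl_insert_take (fun (a b : String × Int) => decide (b.2 < a.2)) n.toNat
    (fun node => (pvNodeId node, deg.getD (pvNodeId node) 0)) _

-- collecting a set from the flattened value lists = A's nested add loop over items
theorem pv_set_flatMap (Ls : List (List (String × Int))) :
    PySem.Set.ofList (Ls.flatMap (fun lst => lst.map (fun q => q.1))) =
      Ls.foldl (fun core l => pvAddAll core l) PySem.Set.empty := by
  rw [PySem.Set.ofList_eq_foldl, List.foldl_flatMap]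
  apply PySem.List.foldl_congr_mem
  intro s l _
  rw [List.foldl_map]
  rfl

-- the two core sets agree
theorem pv_core_eq (nodes : List (List (String × String))) (deg : PySem.Dict String Int)
    (n : Int) (hn : 0 ≤ n) : pvCoreB nodes deg n = pvCoreA nodes deg n := by
  unfold pvCoreA pvCoreB
  have hT : nodes.foldl (pvTopsStep deg n) PySem.Dict.empty =
      nodes.foldl (fun d node =>
        if pvNodeId node = "" then d
        else PySem.Dict.modify d (pvTypeLower node) []
          (fun lst => pvPlace (pvNodeId node, deg.getD (pvNodeId node) 0) lst n))
        PySem.Dict.empty :=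
    PySem.List.foldl_congr_mem nodes _ _ _ (fun d node _ => pvTopsStep_eq deg n d node)
  rw [hT]
  rw [pv_foldl_skip (fun node => pvNodeId node = "")
        (fun (d : PySem.Dict String (List (String × Int))) node => d.modify (pvTypeLower node) []
          (fun lst => pvPlace (pvNodeId node, deg.getD (pvNodeId node) 0) lst n))
        nodes PySem.Dict.empty]
  have hA : nodes.foldl (pvGroupStepA deg) PySem.Dict.empty =
      (nodes.filter (fun x => decide ¬ (pvNodeId x = ""))).foldl
        (fun d node => d.modify (pvTypeLower node) []
          (· ++ [(pvNodeId node, deg.getD (pvNodeId node) 0)])) PySem.Dict.empty := by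
    rw [← pv_foldl_skip (fun node => pvNodeId node = "")
          (fun (d : PySem.Dict String (List (String × Int))) node => d.modify (pvTypeLower node) []
            (· ++ [(pvNodeId node, deg.getD (pvNodeId node) 0)])) nodes PySem.Dict.empty]
    rfl
  rw [hA]
  have hndB : ((nodes.filter (fun x => decide ¬ (pvNodeId x = ""))).foldl
      (fun d node => d.modify (pvTypeLower node) []
        (fun lst => pvPlace (pvNodeId node, deg.getD (pvNodeId node) 0) lst n))
      PySem.Dict.empty).keys.Nodup :=
    PySem.Dict.nodup_keys_foldl_modify_key _ pvTypeLower [] _ PySem.Dict.empty (by simp)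
  have hndA : ((nodes.filter (fun x => decide ¬ (pvNodeId x = ""))).foldl
      (fun d node => d.modify (pvTypeLower node) []
        (· ++ [(pvNodeId node, deg.getD (pvNodeId node) 0)]))
      PySem.Dict.empty).keys.Nodup :=
    PySem.Dict.nodup_keys_foldl_modify_key _ pvTypeLower [] _ PySem.Dict.empty (by simp)
  have hkeys : ((nodes.filter (fun x => decide ¬ (pvNodeId x = ""))).foldl
      (fun d node => d.modify (pvTypeLower node) []
        (fun lst => pvPlace (pvNodeId node, deg.getD (pvNodeId node) 0) lst n))
      PySem.Dict.empty).keys =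
      ((nodes.filter (fun x => decide ¬ (pvNodeId x = ""))).foldl
      (fun d node => d.modify (pvTypeLower node) []
        (· ++ [(pvNodeId node, deg.getD (pvNodeId node) 0)]))
      PySem.Dict.empty).keys := by
    rw [PySem.Dict.keys_foldl_modify_key _ pvTypeLower [] _ PySem.Dict.empty,
        PySem.Dict.keys_foldl_modify_key _ pvTypeLower [] _ PySem.Dict.empty]
  rw [PySem.Dict.values_eq_map_keys _ hndB ([] : List (String × Int)),
      PySem.Dict.items_eq_map_keys _ hndA ([] : List (String × Int)), hkeys]
  rw [pv_set_flatMap, List.foldl_map, List.foldl_map]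
  apply PySem.List.foldl_congr_mem
  intro core t _
  dsimp only
  rw [pv_tops_getD_eq deg n hn _ t]

-- the two fallback blocks agree
theorem pv_fallback_eq (nodes : List (List (String × String))) (deg : PySem.Dict String Int)
    (core : PySem.Set String) : pvFallbackB nodes deg core = pvFallback nodes deg core := by
  unfold pvFallbackB pvFallback pvAddAll
  simp only [pvFirst_one]
  rfl

-- ===== VERDICT (by name: the statement is the Claim_ definition above) =====
theorem select_core_nodes_spec : Claim_equal_select_core_nodes := by
  intro nodes edges n _ hn
  unfold Spec_select_core_nodes select_core_nodes select_core_nodes_alt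
  rw [pv_deg_eq, pv_core_eq nodes (pvDegA edges) n hn, pv_fallback_eq]
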